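-- pv_equiv track=rewrite | github.com/hanrc97/NewsAlert | CUGBNewsCrawl.py | SortNews
-- ===== SOURCE A (Python) =====
-- def SortNews(links, index):
--     No = 0
--     news = ""
--     if index == 1:
--         news = "\n【研院通知·招生】" + "\n"
--         for i in links:
--             No = No + 1
--             news =  news + "\n" + str(No) + "、" + i.get('title') + \
--                     "  ☛" + "https://www1.cugb.edu.cn/" + i.get('href')
--     elif index == 2:
--         news = "\n\n【研院通知·培养与学籍】" + "\n"
--         for i in links:
--             No = No + 1
--             news =  news + "\n" + str(No) + "、" + i.get('title') + \
--                     "  ☛" + "https://www1.cugb.edu.cn/" + i.get('href')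
--     elif index == 3:
--         news = "\n\n【研院通知·学位与学科】" + "\n"
--         for i in links:
--             No = No + 1
--             news =  news + "\n" + str(No) + "、" + i.get('title') + \
--                     "  ☛" + "https://www1.cugb.edu.cn/" + i.get('href')
--     elif index == 4:
--         news = "\n\n【研院通知·通知公告】" + "\n"
--         for i in links:
--             No = No + 1
--             news =  news + "\n" + str(No) + "、" + i.get('title') + \
--                     "  ☛" + "https://www1.cugb.edu.cn/" + i.get('href')
--     elif index == 5:
--         news = "\n\n【水环通知】" + "\n"
--         for i in links:
--             No = No + 1
--             news =  news + "\n" + str(No) + "、" + i.get('title') + \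
--                     "  ☛" + "http://www.swre.cugb.edu.cn/" + i.get('href')
--     return news
-- ===== SOURCE B (Python) =====
-- def SortNews(links, index):
--     if not (1 <= index <= 5):
--         return ""
--     base = "http://www.swre.cugb.edu.cn/" if index == 5 else "https://www1.cugb.edu.cn/"
--     labels = ["研院通知·招生", "研院通知·培养与学籍", "研院通知·学位与学科", "研院通知·通知公告", "水环通知"]
--     header = ("\n" if index == 1 else "\n\n") + "【" + labels[index - 1] + "】\n"
--     # build the body back-to-front: walk the links in reverse, prepending each
--     # line, with the item number counting down from len(links)
--     body = ""
--     no = len(links)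
--     for d in reversed(links):
--         body = "\n" + str(no) + "、" + d.get('title') + "  ☛" + base + d.get('href') + body
--         no -= 1
--     return header + body
-- ===== Notes on version B (the rewrite author's own statement) =====
-- stated objective: alternative
-- what changed: B guards on the 1..5 range once, assembles the header from parts (newline count, label list, brackets) instead of five literal branches, and builds the body BACK-TO-FRONT: it walks the links in reverse, prepending each line with the item number counting down from len(links), instead of A's forward loop appending with an ascending counter.
import Mathlib
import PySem

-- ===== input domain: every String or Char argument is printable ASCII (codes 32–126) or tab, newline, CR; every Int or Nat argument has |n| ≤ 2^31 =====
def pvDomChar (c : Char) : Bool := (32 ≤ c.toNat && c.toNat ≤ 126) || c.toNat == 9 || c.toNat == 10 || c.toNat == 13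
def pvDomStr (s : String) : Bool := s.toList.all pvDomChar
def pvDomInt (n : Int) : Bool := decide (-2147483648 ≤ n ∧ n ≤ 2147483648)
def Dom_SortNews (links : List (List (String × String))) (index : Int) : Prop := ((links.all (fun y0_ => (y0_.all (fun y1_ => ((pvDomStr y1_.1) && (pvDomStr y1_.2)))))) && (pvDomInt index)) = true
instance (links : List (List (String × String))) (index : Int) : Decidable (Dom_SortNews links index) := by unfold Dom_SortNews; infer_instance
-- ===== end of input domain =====

-- B replaces A's five copy-pasted forward-appending branches by one range guard, a header
-- assembled from parts, and a BACK-TO-FRONT body built by prepending lines while walking the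
-- links in reverse with a descending counter (objective: alternative).

-- ===== PORT A =====
-- A's loop body, identical in all five branches of the Python (state = (No, news));
-- i.get('title')/i.get('href') are ported as first-match dict lookup; Pre_ guarantees both keys
-- are present wherever the loop runs, so the .getD "" default is never consulted inside Pre_.
def aStep (base : String) (st : Int × String) (d : List (String × String)) : Int × String :=
  (st.1 + 1,
   st.2 ++ "\n" ++ PySem.Int.toStr (st.1 + 1) ++ "、" ++ ((PySem.Dict.mk d).get? "title").getD ""
        ++ "  ☛" ++ base ++ ((PySem.Dict.mk d).get? "href").getD "")

def SortNews (links : List (List (String × String))) (index : Int) : String :=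
  if index = 1 then
    (links.foldl (aStep "https://www1.cugb.edu.cn/") (0, "\n【研院通知·招生】" ++ "\n")).2
  else if index = 2 then
    (links.foldl (aStep "https://www1.cugb.edu.cn/") (0, "\n\n【研院通知·培养与学籍】" ++ "\n")).2
  else if index = 3 then
    (links.foldl (aStep "https://www1.cugb.edu.cn/") (0, "\n\n【研院通知·学位与学科】" ++ "\n")).2
  else if index = 4 then
    (links.foldl (aStep "https://www1.cugb.edu.cn/") (0, "\n\n【研院通知·通知公告】" ++ "\n")).2
  else if index = 5 then
    (links.foldl (aStep "http://www.swre.cugb.edu.cn/") (0, "\n\n【水环通知】" ++ "\n")).2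
  else ""

-- ===== PORT B =====
def bLine (base : String) (no : Int) (d : List (String × String)) : String :=
  "\n" ++ PySem.Int.toStr no ++ "、" ++ ((PySem.Dict.mk d).get? "title").getD ""
      ++ "  ☛" ++ base ++ ((PySem.Dict.mk d).get? "href").getD ""

-- one step of B's reversed loop: prepend the line for the current (descending) number
def bStep (base : String) (st : Int × String) (d : List (String × String)) : Int × String :=
  (st.1 - 1, bLine base st.1 d ++ st.2)

def bLabels : List String :=
  ["研院通知·招生", "研院通知·培养与学籍", "研院通知·学位与学科", "研院通知·通知公告", "水环通知"]

def SortNews_alt (links : List (List (String × String))) (index : Int) : String :=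
  if 1 ≤ index ∧ index ≤ 5 then
    let base := if index = 5 then "http://www.swre.cugb.edu.cn/" else "https://www1.cugb.edu.cn/"
    let header := (if index = 1 then "\n" else "\n\n") ++ "【"
        ++ (PySem.List.pyGet? bLabels (index - 1)).getD "" ++ "】\n"
    header ++ ((links.reverse).foldl (bStep base) ((links.length : Int), "")).2
  else ""

-- ===== PRECONDITION & SPEC =====
-- Pre_ excludes inputs where the Python raises: with index in 1..5, a link dict missing
-- 'title' or 'href' makes A concatenate None (TypeError).
def Pre_SortNews (links : List (List (String × String))) (index : Int) : Prop :=
  (1 ≤ index ∧ index ≤ 5) →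
    ∀ d ∈ links, ((PySem.Dict.mk d).get? "title").isSome ∧ ((PySem.Dict.mk d).get? "href").isSome
instance (links : List (List (String × String))) (index : Int) : Decidable (Pre_SortNews links index) := by
  unfold Pre_SortNews; infer_instance

def pvWitness_SortNews : (List (List (String × String))) × Int :=
  ([[("title", "Exam dates"), ("href", "news/1.html")]], 1)

def Spec_SortNews (links : List (List (String × String))) (index : Int) (out : String) : Prop := out = SortNews_alt links index
instance (links : List (List (String × String))) (index : Int) (out : String) : Decidable (Spec_SortNews links index out) := by unfold Spec_SortNews; infer_instance

-- ===== CLAIM =====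
def Claim_equal_SortNews : Prop := ∀ (links : List (List (String × String))) (index : Int), Dom_SortNews links index → Pre_SortNews links index → Spec_SortNews links index (SortNews links index)

-- ===== LEMMAS AND PROOFS =====
lemma join_empty_cons (a : String) (l : List String) :
    PySem.Str.join "" (a :: l) = a ++ PySem.Str.join "" l := by
  apply String.toList_inj.mp
  simp [PySem.Str.join, PySem.Chars.join, List.intercalate]
  cases l with
  | nil => simp
  | cons b t => simp

-- A's forward loop appends exactly the enumerated lines
lemma aloop_eq (base : String) (links : List (List (String × String))) (n : Int) (s : String) :
    (links.foldl (aStep base) (n, s)).2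
      = s ++ PySem.Str.join "" ((PySem.List.enumerate links (n + 1)).map (fun p => bLine base p.1 p.2)) := by
  induction links generalizing n s with
  | nil => simp [PySem.List.enumerate, PySem.Str.join, PySem.Chars.join, List.intercalate]
  | cons d t ih =>
      rw [List.foldl_cons]
      show (t.foldl (aStep base) (n + 1, _)).2 = _
      rw [ih, PySem.List.enumerate_cons, List.map_cons, join_empty_cons]
      simp [bLine, String.append_assoc]

-- B's reversed loop prepends exactly the same enumerated lines
lemma bloop_eq (base : String) (links : List (List (String × String))) (n : Int) (s : String) :
    (links.reverse.foldl (bStep base) (n + links.length, s))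
      = (n, PySem.Str.join "" ((PySem.List.enumerate links (n + 1)).map (fun p => bLine base p.1 p.2)) ++ s) := by
  induction links generalizing n s with
  | nil => simp [PySem.List.enumerate, PySem.Str.join, PySem.Chars.join, List.intercalate]
  | cons d t ih =>
      have hlen : (n : Int) + ((d :: t).length : Int) = (n + 1) + (t.length : Int) := by
        simp [List.length_cons]; omega
      rw [List.reverse_cons, List.foldl_append, hlen, ih (n + 1) s]
      simp [bStep, PySem.List.enumerate_cons, List.map_cons, join_empty_cons, bLine,
        String.append_assoc]

lemma branch_eq (base headerA headerB : String) (links : List (List (String × String)))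
    (h : headerA = headerB) :
    (links.foldl (aStep base) (0, headerA)).2
      = headerB ++ ((links.reverse).foldl (bStep base) ((links.length : Int), "")).2 := by
  have hb := bloop_eq base links 0 ""
  rw [aloop_eq, h]
  rw [show ((links.length : Int)) = 0 + (links.length : Int) by omega, hb]
  simp

-- ===== VERDICT =====
theorem SortNews_spec : Claim_equal_SortNews := by
  intro links index _ _
  unfold Spec_SortNews SortNews SortNews_alt
  by_cases h1 : index = 1
  · subst h1; norm_num
    rw [← List.foldl_reverse]
    refine branch_eq _ _ _ links ?_
    decide
  by_cases h2 : index = 2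
  · subst h2; norm_num
    rw [← List.foldl_reverse]
    refine branch_eq _ _ _ links ?_
    decide
  by_cases h3 : index = 3
  · subst h3; norm_num
    rw [← List.foldl_reverse]
    refine branch_eq _ _ _ links ?_
    decide
  by_cases h4 : index = 4
  · subst h4; norm_num
    rw [← List.foldl_reverse]
    refine branch_eq _ _ _ links ?_
    decide
  by_cases h5 : index = 5
  · subst h5; norm_num
    rw [← List.foldl_reverse]
    refine branch_eq _ _ _ links ?_
    decide
  · have hr : ¬ (1 ≤ index ∧ index ≤ 5) := by omega
    simp [h1, h2, h3, h4, h5, hr]
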